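-- pv_equiv track=rewrite | github.com/meowhiks/SCPEventMaker | scpeventmaker.py | parse_command_text
-- ===== SOURCE A (Python) =====
-- def parse_command_text(command_text):
--     segments = []
--     last_end = 0
--     current_color = None
--     while True:
--         start_idx = command_text.find('<color=', last_end)
--         if start_idx == -1:
--             segments.append((command_text[last_end:], current_color))
--             break
--         end_idx = command_text.find('>', start_idx)
--         if end_idx == -1:
--             segments.append((command_text[last_end:], current_color))
--             break
--         if start_idx > last_end:
--             segments.append((command_text[last_end:start_idx], current_color))
--         current_color = command_text[start_idx + 7:end_idx]
--         last_end = end_idx + 1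
--     return segments
-- ===== SOURCE B (Python) =====
-- def parse_command_text(command_text):
--     # single left-to-right character scan with a text buffer; no .find index jumping
--     segments = []
--     buf = []
--     color = None
--     i, n = 0, len(command_text)
--     while i < n:
--         if command_text[i:i + 7] == '<color=':
--             j = i + 7
--             while j < n and command_text[j] != '>':
--                 j += 1
--             if j < n:
--                 if buf:
--                     segments.append((''.join(buf), color))
--                     buf = []
--                 color = command_text[i + 7:j]
--                 i = j + 1
--                 continue
--             buf.append(command_text[i:])
--             break
--         buf.append(command_text[i])
--         i += 1
--     segments.append((''.join(buf), color))
--     return segments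
-- ===== Notes on version B (the rewrite author's own statement) =====
-- stated objective: alternative
-- what changed: Replaces A's find-driven index-jumping state machine (repeated substring searches from last_end) with a single left-to-right character scan that accumulates plain text in a buffer and recognises color tags in place.
import Mathlib
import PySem

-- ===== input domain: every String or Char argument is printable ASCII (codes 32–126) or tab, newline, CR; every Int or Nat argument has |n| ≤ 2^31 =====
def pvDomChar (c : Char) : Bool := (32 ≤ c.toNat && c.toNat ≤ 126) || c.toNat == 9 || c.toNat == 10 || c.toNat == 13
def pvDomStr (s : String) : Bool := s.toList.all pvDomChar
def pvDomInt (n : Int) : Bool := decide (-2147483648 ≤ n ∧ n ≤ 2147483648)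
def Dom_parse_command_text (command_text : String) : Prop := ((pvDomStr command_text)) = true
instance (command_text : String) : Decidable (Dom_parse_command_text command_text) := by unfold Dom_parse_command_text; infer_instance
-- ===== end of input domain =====

-- B replaces A's .find-based index-jumping loop with a single character-by-character scan carrying a text buffer (alternative structure, same cost).

-- ===== PORT A =====
-- A's 'while True' loop as a recursion over (last_end, current_color, segments); the fuel argument
-- (length + 1) only makes the recursion total: last_end strictly increases on every iteration.
def pvAgo (s : String) (last_end : Int) (current_color : Option String) (segments : List (String × Option String)) : Nat → List (String × Option String)
  | 0 => segments
  | fuel + 1 =>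
    let start_idx := PySem.Str.findFrom s "<color=" last_end
    if start_idx = -1 then segments ++ [(PySem.Str.slice s (some last_end) none, current_color)]
    else
      let end_idx := PySem.Str.findFrom s ">" start_idx
      if end_idx = -1 then segments ++ [(PySem.Str.slice s (some last_end) none, current_color)]
      else
        pvAgo s (end_idx + 1)
          (some (PySem.Str.slice s (some (start_idx + 7)) (some end_idx)))
          (if last_end < start_idx then segments ++ [(PySem.Str.slice s (some last_end) (some start_idx), current_color)] else segments)
          fuel

def parse_command_text (command_text : String) : List (String × Option String) :=
  pvAgo command_text 0 none [] (command_text.toList.length + 1)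

-- ===== PORT B =====
-- B's scan: cs = remaining characters, buf = pending plain text, color = current color, segs = output so far.
def pvBgo (cs buf : List Char) (color : Option String) (segs : List (String × Option String)) : List (String × Option String) :=
  match cs with
  | [] => segs ++ [(String.ofList buf, color)]
  | c :: rest =>
    if List.isPrefixOf "<color=".toList (c :: rest) then
      if List.dropWhile (fun ch => ch != '>') ((c :: rest).drop 7) = [] then
        segs ++ [(String.ofList (buf ++ c :: rest), color)]
      else
        pvBgo (List.dropWhile (fun ch => ch != '>') ((c :: rest).drop 7)).tail []
          (some (String.ofList (List.takeWhile (fun ch => ch != '>') ((c :: rest).drop 7))))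
          (if buf ≠ [] then segs ++ [(String.ofList buf, color)] else segs)
    else pvBgo rest (buf ++ [c]) color segs
termination_by cs.length
decreasing_by
  · have h1 := List.length_dropWhile_le (p := fun ch => ch != '>') (l := (c :: rest).drop 7)
    simp only [List.length_drop, List.length_tail] at *
    simp only [List.length_cons] at *
    omega
  · simp

def parse_command_text_alt (command_text : String) : List (String × Option String) :=
  pvBgo command_text.toList [] none []

-- ===== PRECONDITION & SPEC =====
def Spec_parse_command_text (command_text : String) (out : List (String × Option String)) : Prop := out = parse_command_text_alt command_text
instance (command_text : String) (out : List (String × Option String)) : Decidable (Spec_parse_command_text command_text out) := by unfold Spec_parse_command_text; infer_instance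

-- ===== CLAIM (what is proved, stated in full; the proofs are below) =====
def Claim_equal_parse_command_text : Prop := ∀ (command_text : String), Dom_parse_command_text command_text → Spec_parse_command_text command_text (parse_command_text command_text)

-- ===== LEMMAS AND PROOFS =====

theorem pv_gt_prefix_iff (l : List Char) : ['>'] <+: l ↔ ∃ t, l = '>' :: t := by
  cases l with
  | nil => simp
  | cons c t =>
    constructor
    · intro h
      rcases h with ⟨u, hu⟩
      simp at hu
      exact ⟨t, by simp [hu.1.symm]⟩
    · rintro ⟨u, hu⟩
      rw [hu]
      exact ⟨u, rfl⟩

theorem pv_gt_infix_iff (l : List Char) : ['>'] <:+: l ↔ '>' ∈ l := by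
  constructor
  · intro h; exact (List.singleton_sublist).mp h.sublist
  · intro h
    rcases List.append_of_mem h with ⟨p, q, rfl⟩
    exact ⟨p, q, by simp⟩

theorem pv_tw_dw (l : List Char) (m : Nat)
    (hlt : ∀ i < m, ¬ (['>'] <+: l.drop i)) (hm : ['>'] <+: l.drop m) :
    l.takeWhile (fun ch => ch != '>') = l.take m ∧ l.dropWhile (fun ch => ch != '>') = l.drop m := by
  induction l generalizing m with
  | nil =>
    rcases (pv_gt_prefix_iff _).mp hm with ⟨t, ht⟩
    simp at ht
  | cons c rest ih =>
    cases m with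
    | zero =>
      rcases (pv_gt_prefix_iff _).mp hm with ⟨t, ht⟩
      simp at ht
      simp [List.takeWhile, List.dropWhile, ht.1]
    | succ m =>
      have hc : c ≠ '>' := by
        intro hceq
        exact hlt 0 (by omega) (by simp [hceq])
      have ih' := ih m (fun i hi => hlt (i+1) (by omega)) (by simpa using hm)
      have hb : (c != '>') = true := by simp [hc]
      simp [List.takeWhile, List.dropWhile, hb, ih'.1, ih'.2]

theorem pvBgo_noMatch (cs buf : List Char) (color : Option String) (segs : List (String × Option String))
    (h : ¬ ("<color=".toList <:+: cs)) :
    pvBgo cs buf color segs = segs ++ [(String.ofList (buf ++ cs), color)] := by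
  induction cs generalizing buf with
  | nil => simp [pvBgo]
  | cons c rest ih =>
    have hp : List.isPrefixOf "<color=".toList (c :: rest) = false := by
      rw [Bool.eq_false_iff]
      intro hpt
      exact h (List.IsPrefix.isInfix (List.isPrefixOf_iff_prefix.mp hpt))
    rw [pvBgo, hp]
    simp only [Bool.false_eq_true, if_false]
    rw [ih (buf ++ [c]) (fun hi => h (hi.trans (List.infix_cons_iff.mpr (Or.inr (List.infix_refl rest)))))]
    simp

theorem pvBgo_advance (d : Nat) (cs buf : List Char) (color : Option String) (segs : List (String × Option String))
    (h : ∀ i < d, ¬ ("<color=".toList <+: cs.drop i)) :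
    pvBgo cs buf color segs = pvBgo (cs.drop d) (buf ++ cs.take d) color segs := by
  induction d generalizing cs buf with
  | zero => simp
  | succ d ih =>
    cases cs with
    | nil => simp
    | cons c rest =>
      have hp : List.isPrefixOf "<color=".toList (c :: rest) = false := by
        rw [Bool.eq_false_iff]
        intro hpt
        exact h 0 (by omega) (by simpa using List.isPrefixOf_iff_prefix.mp hpt)
      rw [pvBgo, hp]
      simp only [Bool.false_eq_true, if_false]
      rw [ih rest (buf ++ [c]) (fun i hi => by simpa using h (i+1) (by omega))]
      simp

theorem pv_prefix_lit (t : List Char) :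
    List.isPrefixOf "<color=".toList ('<'::'c'::'o'::'l'::'o'::'r'::'='::t) = true := by
  simp [List.isPrefixOf]

theorem pv_slice_none (s : String) (k : Nat) (hk : k ≤ s.toList.length) :
    PySem.Str.slice s (some (k:Int)) none = String.ofList (s.toList.drop k) := by
  rw [PySem.Str.slice, PySem.Chars.slice_eq_listSlice, PySem.List.slice_some_none,
    PySem.List.clampIdx_natCast, Nat.min_eq_left hk]

theorem pv_slice_take (s : String) (k m : Nat) :
    PySem.Str.slice s (some (k:Int)) (some (m:Int)) = String.ofList ((s.toList.drop k).take (m - k)) := by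
  rw [PySem.Str.slice, PySem.Chars.slice_eq_listSlice]
  rw [PySem.List.slice_toNat s.toList (by positivity) (by positivity)]
  simp

theorem pv_main (s : String) (fuel k : Nat) (color : Option String) (segs : List (String × Option String))
    (hk : k ≤ s.toList.length) (hf : s.toList.length - k < fuel) :
    pvAgo s (k : Int) color segs fuel = pvBgo (s.toList.drop k) [] color segs := by
  induction fuel generalizing k color segs with
  | zero => omega
  | succ fuel ih =>
    rw [pvAgo]
    simp only [PySem.Str.findFrom_eq]
    have hnat := PySem.Chars.findFrom_natCast s.toList "<color=".toList k hk
    by_cases h1 : PySem.Chars.find (s.toList.drop k) "<color=".toList = -1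
    · rw [h1] at hnat
      norm_num at hnat
      rw [hnat, if_pos rfl]
      rw [pvBgo_noMatch _ _ _ _ ((PySem.Chars.find_eq_neg_one_iff _ _).mp h1)]
      rw [pv_slice_none s k hk]
      simp
    · rw [if_neg h1] at hnat
      have hge : 0 ≤ PySem.Chars.find (s.toList.drop k) "<color=".toList := by
        have := PySem.Chars.neg_one_le_find (s.toList.drop k) "<color=".toList
        omega
      have hspec := PySem.Chars.find_spec (s := s.toList.drop k) (sub := "<color=".toList) hge
      set d := (PySem.Chars.find (s.toList.drop k) "<color=".toList).toNat with hddef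
      have hfd : PySem.Chars.find (s.toList.drop k) "<color=".toList = (d : Int) :=
        (Int.toNat_of_nonneg hge).symm
      have hkd : (k : Int) + PySem.Chars.find (s.toList.drop k) "<color=".toList = ((k + d : Nat) : Int) := by
        rw [hfd]; push_cast; ring
      rw [hkd] at hnat
      rw [hnat, if_neg (by omega)]
      have hdd : (s.toList.drop k).drop d = s.toList.drop (k + d) := by rw [List.drop_drop]
      have hpre : "<color=".toList <+: s.toList.drop (k + d) := by rw [← hdd]; exact hspec.1
      have hmin : ∀ i < d, ¬ ("<color=".toList <+: (s.toList.drop k).drop i) := hspec.2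
      have hlen7 : k + d + 7 ≤ s.toList.length := by
        have hle := hpre.length_le
        rw [List.length_drop] at hle
        have hp7 : ("<color=".toList).length = 7 := rfl
        omega
      have hpat : "<color=".toList = ['<','c','o','l','o','r','='] := rfl
      obtain ⟨t, ht⟩ := hpre
      have htt : t = s.toList.drop (k + d + 7) := by
        have h7 : (s.toList.drop (k + d)).drop 7 = t := by rw [← ht, hpat]; simp
        rw [← h7, List.drop_drop]
      have hfirst7 : ∀ i < 7, ¬ (['>'] <+: (s.toList.drop (k + d)).drop i) := by
        intro i hi hcon
        rcases (pv_gt_prefix_iff _).mp hcon with ⟨u, hu⟩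
        rw [← ht, hpat] at hu
        interval_cases i <;> simp at hu
      have hkdle : k + d ≤ s.toList.length := by omega
      have hnat2 := PySem.Chars.findFrom_natCast s.toList ">".toList (k + d) hkdle
      -- B side: advance over the d plain characters up to the tag
      rw [pvBgo_advance d (s.toList.drop k) [] color segs hmin, hdd, ← ht, hpat]
      simp only [List.cons_append, List.nil_append]
      rw [pvBgo, if_pos (pv_prefix_lit t)]
      have hdrop7 : (('<'::'c'::'o'::'l'::'o'::'r'::'='::t) : List Char).drop 7 = t := by simp
      by_cases h2 : PySem.Chars.find (s.toList.drop (k + d)) ">".toList = -1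
      · rw [h2] at hnat2
        norm_num at hnat2
        have hnat2' : PySem.Chars.findFrom s.toList ">".toList ((k + d : Nat) : Int) = -1 := by
          push_cast
          exact hnat2
        rw [hnat2', if_pos rfl]
        have hnogt : '>' ∉ s.toList.drop (k + d) :=
          fun hmem => ((PySem.Chars.find_eq_neg_one_iff _ _).mp h2) ((pv_gt_infix_iff _).mpr hmem)
        have hnot : '>' ∉ t := fun hmem => hnogt (by rw [← ht, hpat]; simp [hmem])
        have hdw : List.dropWhile (fun ch => ch != '>') ((('<'::'c'::'o'::'l'::'o'::'r'::'='::t) : List Char).drop 7) = [] := by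
          rw [hdrop7, List.dropWhile_eq_nil_iff]
          intro x hx
          simp only [bne_iff_ne, ne_eq]
          intro hxe
          exact hnot (hxe ▸ hx)
        rw [if_pos hdw]
        rw [pv_slice_none s k hk]
        have hcons : ('<'::'c'::'o'::'l'::'o'::'r'::'='::t : List Char) = "<color=".toList ++ t := by
          rw [hpat]; rfl
        have hjoin : (s.toList.drop k).take d ++ ('<'::'c'::'o'::'l'::'o'::'r'::'='::t) = s.toList.drop k := by
          rw [hcons, ht, ← hdd, List.take_append_drop]
        rw [hjoin]
      · rw [if_neg h2] at hnat2
        have hge2 : 0 ≤ PySem.Chars.find (s.toList.drop (k + d)) ">".toList := by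
          have := PySem.Chars.neg_one_le_find (s.toList.drop (k + d)) ">".toList
          omega
        have hspec2 := PySem.Chars.find_spec (s := s.toList.drop (k + d)) (sub := ">".toList) hge2
        set e := (PySem.Chars.find (s.toList.drop (k + d)) ">".toList).toNat with hedef
        have hfe : PySem.Chars.find (s.toList.drop (k + d)) ">".toList = (e : Int) :=
          (Int.toNat_of_nonneg hge2).symm
        have hkde : ((k + d : Nat) : Int) + PySem.Chars.find (s.toList.drop (k + d)) ">".toList = ((k + d + e : Nat) : Int) := by
          rw [hfe]; push_cast; ring
        rw [hkde] at hnat2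
        rw [hnat2, if_neg (by omega)]
        have hpe : ['>'] <+: (s.toList.drop (k + d)).drop e := hspec2.1
        have hme : ∀ i < e, ¬ (['>'] <+: (s.toList.drop (k + d)).drop i) := hspec2.2
        have he7 : 7 ≤ e := by
          by_contra hlt
          exact hfirst7 e (by omega) hpe
        have helen : k + d + e < s.toList.length := by
          have hle := hpe.length_le
          rw [List.length_drop, List.length_drop] at hle
          have h1' : (['>'] : List Char).length = 1 := rfl
          omega
        -- takeWhile / dropWhile of the tag body t
        have htw := pv_tw_dw t (e - 7)
          (fun i hi => by
            rw [htt, List.drop_drop]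
            have hmi := hme (7 + i) (by omega)
            rw [List.drop_drop] at hmi
            have hidx : k + d + 7 + i = k + d + (7 + i) := by omega
            rw [hidx]
            exact hmi)
          (by
            rw [htt, List.drop_drop]
            have hpe' := hpe
            rw [List.drop_drop] at hpe'
            have hidx : k + d + 7 + (e - 7) = k + d + e := by omega
            rw [hidx]
            exact hpe')
        have hdwt : List.dropWhile (fun ch => ch != '>') ((('<'::'c'::'o'::'l'::'o'::'r'::'='::t) : List Char).drop 7) = t.drop (e - 7) := by
          rw [hdrop7, htw.2]
        have hdne : t.drop (e - 7) ≠ [] := by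
          rw [htt, List.drop_drop]
          intro hnil
          have hlen := congrArg List.length hnil
          rw [List.length_drop] at hlen
          simp only [List.length_nil] at hlen
          omega
        have hne' : List.dropWhile (fun ch => ch != '>') ((('<'::'c'::'o'::'l'::'o'::'r'::'='::t) : List Char).drop 7) ≠ [] := by
          rw [hdwt]; exact hdne
        rw [if_neg hne']
        -- the tail after the closing '>'
        have htail : (List.dropWhile (fun ch => ch != '>') ((('<'::'c'::'o'::'l'::'o'::'r'::'='::t) : List Char).drop 7)).tail
            = s.toList.drop (k + d + e + 1) := by
          rw [hdwt, htt, List.drop_drop, List.tail_drop]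
          congr 1
          omega
        -- the new color
        have hcol : PySem.Str.slice s (some (((k + d : Nat) : Int) + 7)) (some ((k + d + e : Nat) : Int))
            = String.ofList (List.takeWhile (fun ch => ch != '>') ((('<'::'c'::'o'::'l'::'o'::'r'::'='::t) : List Char).drop 7)) := by
          rw [hdrop7, htw.1, htt]
          have : ((k + d : Nat) : Int) + 7 = ((k + d + 7 : Nat) : Int) := by push_cast; ring
          rw [this, pv_slice_take, show k + d + e - (k + d + 7) = e - 7 from by omega]
        rw [hcol, htail]
        -- the flushed plain-text segment
        have hseg : (if (k : Int) < ((k + d : Nat) : Int) then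
              segs ++ [(PySem.Str.slice s (some (k : Int)) (some ((k + d : Nat) : Int)), color)] else segs)
            = (if (s.toList.drop k).take d ≠ [] then
              segs ++ [(String.ofList ((s.toList.drop k).take d), color)] else segs) := by
          by_cases hd0 : d = 0
          · rw [if_neg (by omega), if_neg (by simp [hd0])]
          · rw [if_pos (by omega), if_pos (by
              simp only [ne_eq, ← List.length_eq_zero_iff, List.length_take, List.length_drop]
              omega)]
            rw [pv_slice_take]
            simp
        rw [hseg]
        -- close with the induction hypothesis at k + d + e + 1
        have harg : ((k + d + e : Nat) : Int) + 1 = ((k + d + e + 1 : Nat) : Int) := by push_cast; ring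
        rw [harg]
        exact ih (k + d + e + 1) _ _ (by omega) (by omega)

-- ===== VERDICT (by name: the statement is the Claim_ definition above) =====
theorem parse_command_text_spec : Claim_equal_parse_command_text := by
  intro s _
  unfold Spec_parse_command_text parse_command_text parse_command_text_alt
  have := pv_main s (s.toList.length + 1) 0 none [] (by omega) (by omega)
  simpa using this
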